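-- pv_equiv track=rewrite | github.com/krid78/Advent_of_Code | 2024/python/day21.py | map_to_arrow_path
-- ===== SOURCE A (Python) =====
-- def get_arrow_coordinates():
--     """
--     Define the mapping of keys to coordinates on the arrow grid.
--
--     Returns:
--         dict: Mapping of keys to their respective coordinates (row, column).
--     """
--     return {
--         "A": (1, 0),
--         "^": (1, 1),
--         ">": (0, 0),
--         "v": (0, 1),
--         "<": (0, 2),
--     }
--
-- def map_to_arrow_path(sequence: list[str]) -> list[str]:
--     """
--     Map a sequence of movements and `A` to arrow coordinates.
--
--     Args:
--         sequence (list[str]): A sequence of directions (`<`, `^`, `v`, `>`) and `A`.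
--
--     Returns:
--         list[str]: Transformed sequence in the arrow coordinate system.
--     """
--
--     def move_vertical(cc, tc):
--         # Move vertically
--         while cc[0] != tc[0]:
--             dr = 1 if tc[0] > cc[0] else -1
--             arrow_path.append("^" if dr > 0 else "v")
--             cc = (cc[0] + dr, cc[1])
--             assert cc != (1,2)
--         return cc
--
--     def move_horizontal(cc, tc):
--         # Move horizontally
--         while cc[1] != tc[1]:
--             dc = 1 if tc[1] > cc[1] else -1
--             arrow_path.append("<" if dc > 0 else ">")
--             cc = (cc[0], cc[1] + dc)
--             assert cc != (1,2)
--         return cc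
--
--     arrow_coords = get_arrow_coordinates()
--     arrow_path = []
--     current_coord = (1, 0)  # Start at "A"
--
--     for item in sequence:
--         target_coord = arrow_coords[item]
--
--         #if current_coord == (0,2) and target_coord==(1,0):
--         #    arrow_path.append(">")
--         #    arrow_path.append("^")
--         #    arrow_path.append(">")
--         #    current_coord = target_coord
--         if current_coord[0] > target_coord[0]:
--             current_coord = move_vertical(current_coord, target_coord)
--             current_coord = move_horizontal(current_coord, target_coord)
--         else:
--             current_coord = move_horizontal(current_coord, target_coord)
--             current_coord = move_vertical(current_coord, target_coord)
--
--         # Append the symbol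
--         arrow_path.append("A")
--
--     return arrow_path
-- ===== SOURCE B (Python) =====
-- ARROW_COORDS = {
--     "A": (1, 0),
--     "^": (1, 1),
--     ">": (0, 0),
--     "v": (0, 1),
--     "<": (0, 2),
-- }
--
--
-- def map_to_arrow_path(sequence: list[str]) -> list[str]:
--     """Map a sequence of directions and `A` to arrow-keypad presses.
--
--     Same result as the stepping version, but each leg is emitted in one go
--     from the row/column deltas instead of one step per loop iteration.
--     """
--     path = []
--     r, c = 1, 0  # start at "A"
--     for item in sequence:
--         tr, tc = ARROW_COORDS[item]
--         vert = ["^"] * (tr - r) if tr > r else ["v"] * (r - tr)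
--         horiz = ["<"] * (tc - c) if tc > c else [">"] * (c - tc)
--         if r > tr:
--             path += vert + horiz
--         else:
--             path += horiz + vert
--         path.append("A")
--         r, c = tr, tc
--     return path
-- ===== Notes on version B (the rewrite author's own statement) =====
-- stated objective: simpler
-- what changed: The two one-step-at-a-time while loops (and the shared mutable path list they append to) are replaced by direct delta computation: each leg is emitted in one go as a repeated-character block, concatenated in the same vertical/horizontal order.
import Mathlib
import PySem

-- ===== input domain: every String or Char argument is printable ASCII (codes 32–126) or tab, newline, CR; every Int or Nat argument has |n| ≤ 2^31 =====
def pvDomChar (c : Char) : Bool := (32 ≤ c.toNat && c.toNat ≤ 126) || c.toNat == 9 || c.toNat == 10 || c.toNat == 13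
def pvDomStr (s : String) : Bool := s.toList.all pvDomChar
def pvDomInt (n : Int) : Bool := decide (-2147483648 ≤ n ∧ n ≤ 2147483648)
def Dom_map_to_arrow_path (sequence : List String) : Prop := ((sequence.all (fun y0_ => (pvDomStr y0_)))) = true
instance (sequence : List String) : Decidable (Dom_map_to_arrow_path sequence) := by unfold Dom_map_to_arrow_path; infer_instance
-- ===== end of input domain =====

-- B replaces A's one-step-per-iteration while loops (appending to a shared mutable
-- list) by direct delta computation emitting each leg as one replicated block; proved
-- equal on all sequences over the keypad alphabet (outside it A raises KeyError).

-- ===== PORT A =====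

def get_arrow_coordinates : PySem.Dict String (Int × Int) :=
  PySem.Dict.ofList [("A", (1, 0)), ("^", (1, 1)), (">", (0, 0)), ("v", (0, 1)), ("<", (0, 2))]

-- while cc[0] != tc[0]: one step per iteration, appending one up/down symbol.
-- (A's 'assert cc != (1,2)' never fires on Pre_ inputs, so it is not modelled.)
def moveVertical (cc tc : Int × Int) (path : List String) : (Int × Int) × List String :=
  if cc.1 = tc.1 then (cc, path)
  else
    let dr : Int := if tc.1 > cc.1 then 1 else -1
    moveVertical (cc.1 + dr, cc.2) tc (path ++ [if dr > 0 then "^" else "v"])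
termination_by (tc.1 - cc.1).natAbs
decreasing_by simp_all; split <;> omega

-- while cc[1] != tc[1]: one step per iteration, appending one left/right symbol.
def moveHorizontal (cc tc : Int × Int) (path : List String) : (Int × Int) × List String :=
  if cc.2 = tc.2 then (cc, path)
  else
    let dc : Int := if tc.2 > cc.2 then 1 else -1
    moveHorizontal (cc.1, cc.2 + dc) tc (path ++ [if dc > 0 then "<" else ">"])
termination_by (tc.2 - cc.2).natAbs
decreasing_by simp_all; split <;> omega

-- the for-loop over sequence; on a missing key (KeyError, excluded by Pre_) it stops.
def goA (seq : List String) (cc : Int × Int) (path : List String) : List String :=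
  match seq with
  | [] => path
  | item :: rest =>
    match get_arrow_coordinates.get? item with
    | none => path
    | some tc =>
      let st :=
        if cc.1 > tc.1 then
          let p := moveVertical cc tc path
          moveHorizontal p.1 tc p.2
        else
          let p := moveHorizontal cc tc path
          moveVertical p.1 tc p.2
      goA rest st.1 (st.2 ++ ["A"])

def map_to_arrow_path (sequence : List String) : List String :=
  goA sequence (1, 0) []

-- ===== PORT B =====

def ARROW_COORDS : PySem.Dict String (Int × Int) :=
  PySem.Dict.ofList [("A", (1, 0)), ("^", (1, 1)), (">", (0, 0)), ("v", (0, 1)), ("<", (0, 2))]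

-- per item: whole legs from the deltas, as replicated blocks (Python list * n).
def goB (seq : List String) (r c : Int) (path : List String) : List String :=
  match seq with
  | [] => path
  | item :: rest =>
    match ARROW_COORDS.get? item with
    | none => path
    | some (tr, tc) =>
      let vert := if tr > r then List.replicate (tr - r).toNat "^" else List.replicate (r - tr).toNat "v"
      let horiz := if tc > c then List.replicate (tc - c).toNat "<" else List.replicate (c - tc).toNat ">"
      let path' := if r > tr then path ++ vert ++ horiz else path ++ horiz ++ vert
      goB rest tr tc (path' ++ ["A"])

def map_to_arrow_path_alt (sequence : List String) : List String :=
  goB sequence 1 0 []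

-- ===== PRECONDITION & SPEC =====
-- exactly the inputs where A returns: every item is a keypad key (otherwise KeyError)
def Pre_map_to_arrow_path (sequence : List String) : Prop :=
  ∀ s ∈ sequence, s ∈ (["A", "^", ">", "v", "<"] : List String)
instance (sequence : List String) : Decidable (Pre_map_to_arrow_path sequence) := by
  unfold Pre_map_to_arrow_path; infer_instance

def pvWitness_map_to_arrow_path : List String := ["<", "A", "v", "A"]

def Spec_map_to_arrow_path (sequence : List String) (out : List String) : Prop := out = map_to_arrow_path_alt sequence
instance (sequence : List String) (out : List String) : Decidable (Spec_map_to_arrow_path sequence out) := by unfold Spec_map_to_arrow_path; infer_instance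

-- ===== CLAIM (what is proved, stated in full; the proofs are below) =====
def Claim_equal_map_to_arrow_path : Prop := ∀ (sequence : List String), Dom_map_to_arrow_path sequence → Pre_map_to_arrow_path sequence → Spec_map_to_arrow_path sequence (map_to_arrow_path sequence)

-- ===== LEMMAS AND PROOFS =====

-- the vertical while loop produces exactly B's replicated block and lands on tc's row
theorem moveVertical_eq (tc : Int × Int) :
    ∀ (r c : Int) (path : List String),
      moveVertical (r, c) tc path =
        ((tc.1, c),
         path ++ (if tc.1 > r then List.replicate (tc.1 - r).toNat "^"
                  else List.replicate (r - tc.1).toNat "v")) := by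
  intro r c path
  rw [moveVertical]
  by_cases h : r = tc.1
  · subst h; simp
  · rw [if_neg (by simpa using h)]
    by_cases hlt : tc.1 > r
    · rw [if_pos hlt]
      show moveVertical (r + 1, c) tc (path ++ ["^"]) = _
      rw [moveVertical_eq tc (r + 1) c (path ++ ["^"])]
      have hx : (if tc.1 > r + 1 then List.replicate (tc.1 - (r + 1)).toNat "^"
                 else List.replicate (r + 1 - tc.1).toNat "v")
                = List.replicate (tc.1 - (r + 1)).toNat "^" := by
        split
        · rfl
        · have he : tc.1 = r + 1 := by omega
          simp [he]
      rw [hx, if_pos hlt]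
      have hc : (tc.1 - r).toNat = (tc.1 - (r + 1)).toNat + 1 := by omega
      simp [hc, List.replicate_succ]
    · rw [if_neg hlt]
      show moveVertical (r + -1, c) tc (path ++ ["v"]) = _
      rw [moveVertical_eq tc (r + -1) c (path ++ ["v"])]
      have hx : (if tc.1 > r + -1 then List.replicate (tc.1 - (r + -1)).toNat "^"
                 else List.replicate (r + -1 - tc.1).toNat "v")
                = List.replicate (r + -1 - tc.1).toNat "v" := by
        rw [if_neg (by omega)]
      rw [hx, if_neg hlt]
      have hc : (r - tc.1).toNat = (r + -1 - tc.1).toNat + 1 := by omega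
      simp [hc, List.replicate_succ]
termination_by r _ _ => (tc.1 - r).natAbs
decreasing_by all_goals omega

-- the horizontal while loop likewise
theorem moveHorizontal_eq (tc : Int × Int) :
    ∀ (r c : Int) (path : List String),
      moveHorizontal (r, c) tc path =
        ((r, tc.2),
         path ++ (if tc.2 > c then List.replicate (tc.2 - c).toNat "<"
                  else List.replicate (c - tc.2).toNat ">")) := by
  intro r c path
  rw [moveHorizontal]
  by_cases h : c = tc.2
  · subst h; simp
  · rw [if_neg (by simpa using h)]
    by_cases hlt : tc.2 > c
    · rw [if_pos hlt]
      show moveHorizontal (r, c + 1) tc (path ++ ["<"]) = _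
      rw [moveHorizontal_eq tc r (c + 1) (path ++ ["<"])]
      have hx : (if tc.2 > c + 1 then List.replicate (tc.2 - (c + 1)).toNat "<"
                 else List.replicate (c + 1 - tc.2).toNat ">")
                = List.replicate (tc.2 - (c + 1)).toNat "<" := by
        split
        · rfl
        · have he : tc.2 = c + 1 := by omega
          simp [he]
      rw [hx, if_pos hlt]
      have hc : (tc.2 - c).toNat = (tc.2 - (c + 1)).toNat + 1 := by omega
      simp [hc, List.replicate_succ]
    · rw [if_neg hlt]
      show moveHorizontal (r, c + -1) tc (path ++ [">"]) = _
      rw [moveHorizontal_eq tc r (c + -1) (path ++ [">"])]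
      have hx : (if tc.2 > c + -1 then List.replicate (tc.2 - (c + -1)).toNat "<"
                 else List.replicate (c + -1 - tc.2).toNat ">")
                = List.replicate (c + -1 - tc.2).toNat ">" := by
        rw [if_neg (by omega)]
      rw [hx, if_neg hlt]
      have hc : (c - tc.2).toNat = (c + -1 - tc.2).toNat + 1 := by omega
      simp [hc, List.replicate_succ]
termination_by _ c _ => (tc.2 - c).natAbs
decreasing_by all_goals omega

-- the two for-loops agree from any common state
theorem goA_eq_goB (seq : List String) :
    ∀ (r c : Int) (path : List String), goA seq (r, c) path = goB seq r c path := by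
  induction seq with
  | nil => intro r c path; rfl
  | cons item rest ih =>
    intro r c path
    rw [goA, goB]
    cases hget : get_arrow_coordinates.get? item with
    | none =>
      have h2 : ARROW_COORDS.get? item = none := hget
      rw [h2]
    | some tc =>
      have h2 : ARROW_COORDS.get? item = some tc := hget
      rw [h2]
      obtain ⟨tr, tcc⟩ := tc
      simp only
      by_cases hb : r > tr
      · rw [if_pos hb, if_pos hb]
        rw [moveVertical_eq ⟨tr, tcc⟩ r c path]
        simp only
        rw [moveHorizontal_eq ⟨tr, tcc⟩ tr c _]
        simp only
        exact ih tr tcc _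
      · rw [if_neg hb, if_neg hb]
        rw [moveHorizontal_eq ⟨tr, tcc⟩ r c path]
        simp only
        rw [moveVertical_eq ⟨tr, tcc⟩ r tcc _]
        simp only
        exact ih tr tcc _

-- ===== VERDICT (by name: the statement is the Claim_ definition above) =====
theorem map_to_arrow_path_spec : Claim_equal_map_to_arrow_path := by
  intro sequence _ _
  unfold Spec_map_to_arrow_path map_to_arrow_path map_to_arrow_path_alt
  exact goA_eq_goB sequence 1 0 []
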